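-- pv_equiv track=rewrite | github.com/Stusab/XAI-Phyto-Prototype | src/data_loader.py | _parse_feature_col
-- ===== SOURCE A (Python) =====
-- def _parse_feature_col(col_name):
--     """
--     Zerlegt einen Spaltennamen in (prefix, channel, symptom_text).
--
--     Beispiele:
--         'sym_evidenz_basiert_Husten'           → ('sym_', 'evidenz_basiert', 'Husten')
--         'sym_traditionell_hmpc_trockener Reizhusten' → ('sym_', 'traditionell_hmpc', 'trockener Reizhusten')
--         'use_evidenz_basiert_produktiver Husten' → ('use_', 'evidenz_basiert', 'produktiver Husten')
--         'chem_Flavonoide'                      → ('chem_', '', 'Flavonoide')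
--         'risk_MAGEN'                           → ('risk_', '', 'MAGEN')
--     """
--     # sym_ und use_ haben Channels
--     for prefix in ['sym_', 'use_']:
--         if col_name.startswith(prefix):
--             rest = col_name[len(prefix):]
--             for channel in ['evidenz_basiert_', 'traditionell_hmpc_']:
--                 if rest.startswith(channel):
--                     text = rest[len(channel):]
--                     return prefix, channel.rstrip('_'), text
--             # Kein bekannter Channel
--             return prefix, 'unknown', rest
--
--     # linksym / linkind haben auch Channels
--     for prefix in ['linksym', 'linkind']:
--         if col_name.startswith(prefix):
--             rest = col_name[len(prefix):]
--             for channel in ['evidenzbasiert_', 'traditionellhmpc_']: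
--                 if rest.startswith(channel):
--                     text = rest[len(channel):]
--                     return prefix, channel.rstrip('_'), text
--             return prefix, 'unknown', rest
--
--     # chem_, risk_ → kein Channel
--     for prefix in ['chem_', 'risk_']:
--         if col_name.startswith(prefix):
--             return prefix, '', col_name[len(prefix):]
--
--     return 'other_', '', col_name
-- ===== SOURCE B (Python) =====
-- # Flattened rewrite: the nested prefix/channel matching is precomputed into one flat list of
-- # full patterns (prefix+channel concatenated, channel label already stripped); a single scan
-- # finds the first matching pattern and slices the tail off col_name directly.
-- _FLAT = [
--     ("sym_evidenz_basiert_", "sym_", "evidenz_basiert"),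
--     ("sym_traditionell_hmpc_", "sym_", "traditionell_hmpc"),
--     ("sym_", "sym_", "unknown"),
--     ("use_evidenz_basiert_", "use_", "evidenz_basiert"),
--     ("use_traditionell_hmpc_", "use_", "traditionell_hmpc"),
--     ("use_", "use_", "unknown"),
--     ("linksymevidenzbasiert_", "linksym", "evidenzbasiert"),
--     ("linksymtraditionellhmpc_", "linksym", "traditionellhmpc"),
--     ("linksym", "linksym", "unknown"),
--     ("linkindevidenzbasiert_", "linkind", "evidenzbasiert"),
--     ("linkindtraditionellhmpc_", "linkind", "traditionellhmpc"),
--     ("linkind", "linkind", "unknown"),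
--     ("chem_", "chem_", ""),
--     ("risk_", "risk_", ""),
-- ]
--
-- def _parse_feature_col(col_name):
--     for pattern, prefix, channel in _FLAT:
--         if col_name.startswith(pattern):
--             return prefix, channel, col_name[len(pattern):]
--     return 'other_', '', col_name
-- ===== Notes on version B (the rewrite author's own statement) =====
-- stated objective: simpler
-- what changed: The nested prefix-then-channel matching with rstrip and two-stage slicing is flattened into a single scan over one precomputed list of full prefix+channel patterns with ready-made channel labels, slicing the tail off col_name once.
import Mathlib
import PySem

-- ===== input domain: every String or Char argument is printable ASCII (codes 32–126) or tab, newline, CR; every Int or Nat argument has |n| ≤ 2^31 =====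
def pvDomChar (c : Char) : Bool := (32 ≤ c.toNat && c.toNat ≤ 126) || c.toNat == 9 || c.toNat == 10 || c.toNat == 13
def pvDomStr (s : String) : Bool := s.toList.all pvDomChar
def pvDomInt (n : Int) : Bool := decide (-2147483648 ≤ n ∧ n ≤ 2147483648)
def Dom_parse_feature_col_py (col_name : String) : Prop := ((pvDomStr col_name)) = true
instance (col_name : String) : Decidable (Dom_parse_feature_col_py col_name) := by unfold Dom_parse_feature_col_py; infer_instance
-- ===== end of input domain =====

-- B flattens A's nested prefix/channel matching into a single scan of one precomputed list of
-- full prefix+channel patterns with ready-made channel labels (objective: simpler).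

-- hand port of Python's s.rstrip(chars) (no PySem primitive for rstrip with an argument); exact:
-- drops trailing characters that occur in `chars`
def pvRstrip (s : String) (chars : String) : String :=
  String.ofList (List.dropWhile (fun c => c ∈ chars.toList) s.toList.reverse).reverse

-- ===== PORT A =====
-- A's two `for prefix in [..]` / `for channel in [..]` loops over two-element literal lists with
-- early `return` are transliterated as the corresponding if-chains, in source order.
def parse_feature_col_py (col_name : String) : String × String × String :=
  if PySem.Str.startswith col_name "sym_" then
    let rest := PySem.Str.slice col_name (some 4) none
    if PySem.Str.startswith rest "evidenz_basiert_" then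
      ("sym_", pvRstrip "evidenz_basiert_" "_", PySem.Str.slice rest (some 16) none)
    else if PySem.Str.startswith rest "traditionell_hmpc_" then
      ("sym_", pvRstrip "traditionell_hmpc_" "_", PySem.Str.slice rest (some 18) none)
    else ("sym_", "unknown", rest)
  else if PySem.Str.startswith col_name "use_" then
    let rest := PySem.Str.slice col_name (some 4) none
    if PySem.Str.startswith rest "evidenz_basiert_" then
      ("use_", pvRstrip "evidenz_basiert_" "_", PySem.Str.slice rest (some 16) none)
    else if PySem.Str.startswith rest "traditionell_hmpc_" then
      ("use_", pvRstrip "traditionell_hmpc_" "_", PySem.Str.slice rest (some 18) none)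
    else ("use_", "unknown", rest)
  else if PySem.Str.startswith col_name "linksym" then
    let rest := PySem.Str.slice col_name (some 7) none
    if PySem.Str.startswith rest "evidenzbasiert_" then
      ("linksym", pvRstrip "evidenzbasiert_" "_", PySem.Str.slice rest (some 15) none)
    else if PySem.Str.startswith rest "traditionellhmpc_" then
      ("linksym", pvRstrip "traditionellhmpc_" "_", PySem.Str.slice rest (some 17) none)
    else ("linksym", "unknown", rest)
  else if PySem.Str.startswith col_name "linkind" then
    let rest := PySem.Str.slice col_name (some 7) none
    if PySem.Str.startswith rest "evidenzbasiert_" then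
      ("linkind", pvRstrip "evidenzbasiert_" "_", PySem.Str.slice rest (some 15) none)
    else if PySem.Str.startswith rest "traditionellhmpc_" then
      ("linkind", pvRstrip "traditionellhmpc_" "_", PySem.Str.slice rest (some 17) none)
    else ("linkind", "unknown", rest)
  else if PySem.Str.startswith col_name "chem_" then
    ("chem_", "", PySem.Str.slice col_name (some 5) none)
  else if PySem.Str.startswith col_name "risk_" then
    ("risk_", "", PySem.Str.slice col_name (some 5) none)
  else ("other_", "", col_name)

-- ===== PORT B =====
-- Source B's flat pattern table _FLAT
def pvFlat : List (String × String × String) :=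
  [ ("sym_evidenz_basiert_", "sym_", "evidenz_basiert"),
    ("sym_traditionell_hmpc_", "sym_", "traditionell_hmpc"),
    ("sym_", "sym_", "unknown"),
    ("use_evidenz_basiert_", "use_", "evidenz_basiert"),
    ("use_traditionell_hmpc_", "use_", "traditionell_hmpc"),
    ("use_", "use_", "unknown"),
    ("linksymevidenzbasiert_", "linksym", "evidenzbasiert"),
    ("linksymtraditionellhmpc_", "linksym", "traditionellhmpc"),
    ("linksym", "linksym", "unknown"),
    ("linkindevidenzbasiert_", "linkind", "evidenzbasiert"),
    ("linkindtraditionellhmpc_", "linkind", "traditionellhmpc"),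
    ("linkind", "linkind", "unknown"),
    ("chem_", "chem_", ""),
    ("risk_", "risk_", "") ]

-- Source B's single `for pattern, prefix, channel in _FLAT` loop with early return
def pvScan (col_name : String) : List (String × String × String) → String × String × String
  | [] => ("other_", "", col_name)
  | (pat, pre, ch) :: t =>
    if PySem.Str.startswith col_name pat then
      (pre, ch, PySem.Str.slice col_name (some (PySem.Str.len pat : Int)) none)
    else pvScan col_name t

def parse_feature_col_py_alt (col_name : String) : String × String × String :=
  pvScan col_name pvFlat

-- ===== PRECONDITION & SPEC =====
def Spec_parse_feature_col_py (col_name : String) (out : String × String × String) : Prop := out = parse_feature_col_py_alt col_name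
instance (col_name : String) (out : String × String × String) : Decidable (Spec_parse_feature_col_py col_name out) := by unfold Spec_parse_feature_col_py; infer_instance

-- ===== CLAIM =====
def Claim_equal_parse_feature_col_py : Prop := ∀ (col_name : String), Dom_parse_feature_col_py col_name → Spec_parse_feature_col_py col_name (parse_feature_col_py col_name)

-- ===== LEMMAS AND PROOFS =====

-- startswith against a concatenated pattern splits into two startswith tests
theorem pv_isPrefixOf_append (p q l : List Char) :
    (p ++ q).isPrefixOf l = (p.isPrefixOf l && q.isPrefixOf (l.drop p.length)) := by
  induction p generalizing l with
  | nil => simp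
  | cons a p ih =>
    cases l with
    | nil => simp [List.isPrefixOf]
    | cons b l => simp [List.isPrefixOf, ih, Bool.and_assoc]

theorem pv_sw_append (s p q : String) :
    PySem.Str.startswith s (p ++ q)
      = (PySem.Str.startswith s p
          && PySem.Str.startswith (PySem.Str.slice s (some (p.length : Int)) none) q) := by
  simp [PySem.Str.startswith, PySem.Str.slice, PySem.Chars.startswith, PySem.Chars.slice,
        PySem.List.slice_from_natCast, pv_isPrefixOf_append]

-- composing two nonnegative from-slices adds the offsets (list level, then string level)
theorem pv_list_slice_slice (l : List Char) (a b : Int) (ha : 0 ≤ a) (hb : 0 ≤ b) :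
    PySem.List.slice (PySem.List.slice l (some a) none) (some b) none
      = PySem.List.slice l (some (a + b)) none := by
  rw [PySem.List.slice_from l ha, PySem.List.slice_from _ hb,
      PySem.List.slice_from _ (by omega : (0:Int) ≤ a + b), List.drop_drop]
  congr 1; omega

theorem pv_slice_slice (s : String) (a b : Int) (ha : 0 ≤ a) (hb : 0 ≤ b) :
    PySem.Str.slice (PySem.Str.slice s (some a) none) (some b) none
      = PySem.Str.slice s (some (a + b)) none := by
  simp [PySem.Str.slice, PySem.Chars.slice, pv_list_slice_slice _ _ _ ha hb]

-- ===== VERDICT =====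
set_option maxHeartbeats 1600000 in
theorem parse_feature_col_py_spec : Claim_equal_parse_feature_col_py := by
  intro c _
  unfold Spec_parse_feature_col_py parse_feature_col_py parse_feature_col_py_alt pvFlat
  simp only [pvScan]
  have hr1 : pvRstrip "evidenz_basiert_" "_" = "evidenz_basiert" := by decide
  have hr2 : pvRstrip "traditionell_hmpc_" "_" = "traditionell_hmpc" := by decide
  have hr3 : pvRstrip "evidenzbasiert_" "_" = "evidenzbasiert" := by decide
  have hr4 : pvRstrip "traditionellhmpc_" "_" = "traditionellhmpc" := by decide
  -- split B's full patterns into prefix + channel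
  have hp1 : ("sym_evidenz_basiert_" : String) = "sym_" ++ "evidenz_basiert_" := by decide
  have hp2 : ("sym_traditionell_hmpc_" : String) = "sym_" ++ "traditionell_hmpc_" := by decide
  have hp3 : ("use_evidenz_basiert_" : String) = "use_" ++ "evidenz_basiert_" := by decide
  have hp4 : ("use_traditionell_hmpc_" : String) = "use_" ++ "traditionell_hmpc_" := by decide
  have hp5 : ("linksymevidenzbasiert_" : String) = "linksym" ++ "evidenzbasiert_" := by decide
  have hp6 : ("linksymtraditionellhmpc_" : String) = "linksym" ++ "traditionellhmpc_" := by decide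
  have hp7 : ("linkindevidenzbasiert_" : String) = "linkind" ++ "evidenzbasiert_" := by decide
  have hp8 : ("linkindtraditionellhmpc_" : String) = "linkind" ++ "traditionellhmpc_" := by decide
  -- pattern lengths (B side), stated on the appended form
  have hl1 : (PySem.Str.len ("sym_" ++ "evidenz_basiert_") : Int) = 20 := by decide
  have hl2 : (PySem.Str.len ("sym_" ++ "traditionell_hmpc_") : Int) = 22 := by decide
  have hl3 : (PySem.Str.len "sym_" : Int) = 4 := by decide
  have hl4 : (PySem.Str.len ("use_" ++ "evidenz_basiert_") : Int) = 20 := by decide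
  have hl5 : (PySem.Str.len ("use_" ++ "traditionell_hmpc_") : Int) = 22 := by decide
  have hl6 : (PySem.Str.len "use_" : Int) = 4 := by decide
  have hl7 : (PySem.Str.len ("linksym" ++ "evidenzbasiert_") : Int) = 22 := by decide
  have hl8 : (PySem.Str.len ("linksym" ++ "traditionellhmpc_") : Int) = 24 := by decide
  have hl9 : (PySem.Str.len "linksym" : Int) = 7 := by decide
  have hl10 : (PySem.Str.len ("linkind" ++ "evidenzbasiert_") : Int) = 22 := by decide
  have hl11 : (PySem.Str.len ("linkind" ++ "traditionellhmpc_") : Int) = 24 := by decide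
  have hl12 : (PySem.Str.len "linkind" : Int) = 7 := by decide
  have hl13 : (PySem.Str.len "chem_" : Int) = 5 := by decide
  have hl14 : (PySem.Str.len "risk_" : Int) = 5 := by decide
  have hq1 : (("sym_" : String).length : Int) = 4 := by decide
  have hq2 : (("use_" : String).length : Int) = 4 := by decide
  have hq3 : (("linksym" : String).length : Int) = 7 := by decide
  have hq4 : (("linkind" : String).length : Int) = 7 := by decide
  -- compose A's two-stage slices
  have hs1 : ∀ s : String, PySem.Str.slice (PySem.Str.slice s (some 4) none) (some 16) none
      = PySem.Str.slice s (some 20) none := by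
    intro s; rw [pv_slice_slice s 4 16 (by norm_num) (by norm_num)]; norm_num
  have hs2 : ∀ s : String, PySem.Str.slice (PySem.Str.slice s (some 4) none) (some 18) none
      = PySem.Str.slice s (some 22) none := by
    intro s; rw [pv_slice_slice s 4 18 (by norm_num) (by norm_num)]; norm_num
  have hs3 : ∀ s : String, PySem.Str.slice (PySem.Str.slice s (some 7) none) (some 15) none
      = PySem.Str.slice s (some 22) none := by
    intro s; rw [pv_slice_slice s 7 15 (by norm_num) (by norm_num)]; norm_num
  have hs4 : ∀ s : String, PySem.Str.slice (PySem.Str.slice s (some 7) none) (some 17) none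
      = PySem.Str.slice s (some 24) none := by
    intro s; rw [pv_slice_slice s 7 17 (by norm_num) (by norm_num)]; norm_num
  simp only [hp1, hp2, hp3, hp4, hp5, hp6, hp7, hp8,
             hl1, hl2, hl3, hl4, hl5, hl6, hl7, hl8, hl9, hl10, hl11, hl12, hl13, hl14,
             pv_sw_append, hq1, hq2, hq3, hq4, hr1, hr2, hr3, hr4, hs1, hs2, hs3, hs4]
  by_cases h1 : PySem.Chars.startswith c.toList ['s','y','m','_'] = true <;>
    by_cases h2 : PySem.Chars.startswith c.toList ['u','s','e','_'] = true <;>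
      by_cases h3 : PySem.Chars.startswith c.toList ['l','i','n','k','s','y','m'] = true <;>
        by_cases h4 : PySem.Chars.startswith c.toList ['l','i','n','k','i','n','d'] = true <;>
          by_cases h5 : PySem.Chars.startswith c.toList ['c','h','e','m','_'] = true <;>
            by_cases h6 : PySem.Chars.startswith c.toList ['r','i','s','k','_'] = true <;>
              simp [h1, h2, h3, h4, h5, h6]
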